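-- pv_equiv track=rewrite | github.com/sergioardz/proyectos-py | Q2_revised.py | john_mary
-- ===== SOURCE A (Python) =====
-- def john_mary(str):
--     """
--     Input: String
--     Output: Boolean
--     Checks wether substrings 'John' and 'Mary' are present the same amount of
--     times within the passed string. Case Insensitive.
--     """
--     # Start counters
--     john = 0
--     mary = 0
--     # Iterate through string length minus 3 positions to accomodate last slice
--     for i in range(len(str)-3):
--         # Collect slices and manage case insensitivity converting all to lower
--         aux = str[i:i+4]
--         aux_lower = aux.lower()
--         # Adjust counters accordingly
--         if aux_lower == 'john':
--             john += 1
--         elif aux_lower == 'mary':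
--             mary += 1
--     # Return boolean value
--     return john == mary
-- ===== SOURCE B (Python) =====
-- def john_mary(str):
--     # Greedy non-overlapping scan: lowercase once, walk an index, jump 4 past each
--     # match ('john'/'mary' cannot self- or cross-overlap), keep one signed balance.
--     s = str.lower()
--     n = len(s)
--     bal = 0
--     i = 0
--     while i + 4 <= n:
--         w = s[i:i+4]
--         if w == 'john':
--             bal += 1
--             i += 4
--         elif w == 'mary':
--             bal -= 1
--             i += 4
--         else:
--             i += 1
--     return bal == 0
-- ===== Notes on version B (the rewrite author's own statement) =====
-- stated objective: alternative
-- what changed: Replaces A's exhaustive step-1 window loop with two counters by a greedy non-overlapping scan: lowercase once, advance a single index that jumps 4 past every match, and keep one signed john-minus-mary balance tested against zero; exact because 'john' and 'mary' can neither self- nor cross-overlap, so the skipped positions can hold no match.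
import Mathlib
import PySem

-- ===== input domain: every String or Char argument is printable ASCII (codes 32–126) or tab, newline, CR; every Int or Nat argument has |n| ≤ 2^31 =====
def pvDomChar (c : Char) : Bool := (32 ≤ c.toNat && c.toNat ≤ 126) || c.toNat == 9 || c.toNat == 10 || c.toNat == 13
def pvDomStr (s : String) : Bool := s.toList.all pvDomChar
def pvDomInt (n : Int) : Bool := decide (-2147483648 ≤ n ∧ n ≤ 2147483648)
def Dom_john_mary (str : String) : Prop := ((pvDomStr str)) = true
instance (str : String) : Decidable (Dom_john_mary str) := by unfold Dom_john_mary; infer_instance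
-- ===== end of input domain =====

-- B replaces A's exhaustive window loop (two counters, step 1) by a greedy non-overlapping
-- scan: lowercase once, jump 4 past each match, keep one signed balance (objective: alternative;
-- exact because 'john' and 'mary' can neither self- nor cross-overlap).


-- ===== PORT A =====
-- literal transliteration: loop i over range(len(str)-3), slice str[i:i+4], lower it,
-- bump one of the two counters on a match, finally compare the counters
def john_mary (str : String) : Bool :=
  let counts : Int × Int :=
    (PySem.List.pyRange 0 (PySem.Str.len str - 3)).foldl
      (fun (s : Int × Int) (i : Int) =>
        let aux := PySem.Str.slice str (some i) (some (i + 4))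
        let aux_lower := PySem.Str.lower aux
        if aux_lower == "john" then (s.1 + 1, s.2)
        else if aux_lower == "mary" then (s.1, s.2 + 1)
        else s)
      (0, 0)
  counts.1 == counts.2

-- ===== PORT B =====
-- literal transliteration of Source B's while loop: index i, jump 4 past a match, single balance
def jmLoop (s : String) (n : Int) (i : Int) (bal : Int) : Int :=
  if h : i + 4 ≤ n then
    let w := PySem.Str.slice s (some i) (some (i + 4))
    if w == "john" then jmLoop s n (i + 4) (bal + 1)
    else if w == "mary" then jmLoop s n (i + 4) (bal - 1)
    else jmLoop s n (i + 1) bal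
  else bal
termination_by (n - i).toNat
decreasing_by all_goals omega

def john_mary_alt (str : String) : Bool :=
  let s := PySem.Str.lower str
  let n := PySem.Str.len s
  jmLoop s n 0 0 == 0

-- ===== PRECONDITION & SPEC =====
def Spec_john_mary (str : String) (out : Bool) : Prop := out = john_mary_alt str
instance (str : String) (out : Bool) : Decidable (Spec_john_mary str out) := by unfold Spec_john_mary; infer_instance

-- ===== CLAIM (what is proved, stated in full; the proofs are below) =====
def Claim_equal_john_mary : Prop := ∀ (str : String), Dom_john_mary str → Spec_john_mary str (john_mary str)

-- ===== LEMMAS AND PROOFS =====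

-- number of window positions where p occurs (overlapping count, as A's loop counts)
def winCount (p : List Char) : List Char → Nat
  | [] => 0
  | c :: t => (if p.isPrefixOf (c :: t) then 1 else 0) + winCount p t

lemma winCount_eq_zero_of_short (p l : List Char) (hp : p.length = 4) (hl : l.length < 4) :
    winCount p l = 0 := by
  induction l with
  | nil => rfl
  | cons c t ih =>
    have hnp : p.isPrefixOf (c :: t) = false := by
      rw [Bool.eq_false_iff]
      intro h
      have hle := (List.isPrefixOf_iff_prefix.mp h).length_le
      rw [hp] at hle
      simp only [List.length_cons] at hl hle
      omega
    have ht := ih (by simp only [List.length_cons] at hl; omega)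
    simp [winCount, hnp, ht]

lemma winCount_drop_one (p l : List Char) (h : p.isPrefixOf l = false) :
    winCount p l = winCount p (l.drop 1) := by
  cases l with
  | nil => rfl
  | cons c t => simp [winCount, h]

-- if p occurs at l and p shifted by k < 4 is no prefix of q, then q cannot occur at l+k
lemma not_prefix_drop (p q l : List Char) (hp : p.length = 4) (hq : 4 ≤ q.length)
    (h : p.isPrefixOf l = true) (k : Nat) (hk : k < 4)
    (hov : (p.drop k).isPrefixOf q = false) :
    q.isPrefixOf (l.drop k) = false := by
  rw [Bool.eq_false_iff]
  intro hcon
  obtain ⟨r, hr⟩ := List.isPrefixOf_iff_prefix.mp h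
  have hlk : l.drop k = p.drop k ++ r := by
    rw [← hr, List.drop_append_of_le_length (by omega)]
  have h1 : p.drop k <+: l.drop k := ⟨r, hlk.symm⟩
  have h2 : q <+: l.drop k := List.isPrefixOf_iff_prefix.mp hcon
  have h3 : p.drop k <+: q :=
    List.prefix_of_prefix_length_le h1 h2 (by simp [hp]; omega)
  rw [Bool.eq_false_iff] at hov
  exact hov (List.isPrefixOf_iff_prefix.mpr h3)

-- a match of p at the front of l forces no match of q anywhere in the next 4 positions,
-- so the window count of q is unchanged by dropping 4
lemma winCount_drop4_other (p q l : List Char) (hp : p.length = 4) (hq : q.length = 4)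
    (h : p.isPrefixOf l = true)
    (hov : ∀ k, k < 4 → (p.drop k).isPrefixOf q = false) :
    winCount q l = winCount q (l.drop 4) := by
  have h0 : q.isPrefixOf l = false := by
    have := not_prefix_drop p q l hp (by omega) h 0 (by omega) (hov 0 (by omega))
    simpa using this
  have h1 : q.isPrefixOf (l.drop 1) = false :=
    not_prefix_drop p q l hp (by omega) h 1 (by omega) (hov 1 (by omega))
  have h2 : q.isPrefixOf (l.drop 2) = false :=
    not_prefix_drop p q l hp (by omega) h 2 (by omega) (hov 2 (by omega))
  have h3 : q.isPrefixOf (l.drop 3) = false :=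
    not_prefix_drop p q l hp (by omega) h 3 (by omega) (hov 3 (by omega))
  rw [winCount_drop_one q l h0, winCount_drop_one q (l.drop 1) h1, List.drop_drop,
      winCount_drop_one q (l.drop 2) h2, List.drop_drop,
      winCount_drop_one q (l.drop 3) h3, List.drop_drop]

-- a match of p at the front of l is the only match of p in the next 4 positions
lemma winCount_drop4_self (p l : List Char) (hp : p.length = 4)
    (h : p.isPrefixOf l = true)
    (hov : ∀ k, 0 < k → k < 4 → (p.drop k).isPrefixOf p = false) :
    winCount p l = 1 + winCount p (l.drop 4) := by
  cases l with
  | nil =>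
    exfalso
    have hle := (List.isPrefixOf_iff_prefix.mp h).length_le
    simp [hp] at hle
  | cons c t =>
    have h1 : p.isPrefixOf t = false := by
      simpa using not_prefix_drop p p (c :: t) hp (by omega) h 1 (by omega)
        (hov 1 (by omega) (by omega))
    have h2 : p.isPrefixOf (t.drop 1) = false := by
      simpa using not_prefix_drop p p (c :: t) hp (by omega) h 2 (by omega)
        (hov 2 (by omega) (by omega))
    have h3 : p.isPrefixOf (t.drop 2) = false := by
      simpa using not_prefix_drop p p (c :: t) hp (by omega) h 3 (by omega)
        (hov 3 (by omega) (by omega))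
    have d12 : (t.drop 1).drop 1 = t.drop 2 := by rw [List.drop_drop]
    have d23 : (t.drop 2).drop 1 = t.drop 3 := by rw [List.drop_drop]
    have hd4 : (c :: t).drop 4 = t.drop 3 := rfl
    rw [hd4]
    simp only [winCount, h, if_true]
    rw [winCount_drop_one p t h1, winCount_drop_one p (t.drop 1) h2, d12,
        winCount_drop_one p (t.drop 2) h3, d23]

-- A's window loop, as a countP over range (len - 3), equals winCount
lemma countP_range_eq_winCount (p : List Char) (hp : p.length = 4) :
    ∀ cs : List Char,
      (List.range (cs.length - 3)).countP (fun j => decide ((cs.drop j).take 4 = p)) =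
        winCount p cs := by
  intro cs
  induction cs with
  | nil => rfl
  | cons c t ih =>
    by_cases hm : t.length < 3
    · have h0 : (c :: t).length - 3 = 0 := by simp; omega
      rw [h0]
      simp only [List.range_zero, List.countP_nil]
      exact (winCount_eq_zero_of_short p (c :: t) hp (by simp; omega)).symm
    · have h1 : (c :: t).length - 3 = (t.length - 3) + 1 := by simp; omega
      rw [h1, List.range_succ_eq_map, List.countP_cons, List.countP_map]
      have hmap : (fun j => decide (((c :: t).drop j).take 4 = p)) ∘ Nat.succ =
          fun j => decide ((t.drop j).take 4 = p) := by
        funext j; rfl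
      rw [hmap, ih]
      have hpref : (decide (((c :: t).drop 0).take 4 = p)) =
          p.isPrefixOf (c :: t) := by
        simp only [List.drop_zero]
        rcases Bool.eq_false_or_eq_true (p.isPrefixOf (c :: t)) with hb | hb
        · rw [hb, decide_eq_true_eq]
          have hq := List.prefix_iff_eq_take.mp (List.isPrefixOf_iff_prefix.mp hb)
          rw [hp] at hq
          exact hq.symm
        · rw [hb, decide_eq_false_iff_not]
          intro he
          rw [Bool.eq_false_iff] at hb
          exact hb (List.isPrefixOf_iff_prefix.mpr
            (List.prefix_iff_eq_take.mpr (by rw [hp, he])))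
      rw [hpref]
      simp only [winCount]
      by_cases h : p.isPrefixOf (c :: t)
      · simp [h]
        omega
      · simp [h]

lemma hov_john_self : ∀ k, 0 < k → k < 4 →
    ((['j','o','h','n'] : List Char).drop k).isPrefixOf ['j','o','h','n'] = false := by
  intro k h1 h2
  interval_cases k <;> decide

lemma hov_mary_self : ∀ k, 0 < k → k < 4 →
    ((['m','a','r','y'] : List Char).drop k).isPrefixOf ['m','a','r','y'] = false := by
  intro k h1 h2
  interval_cases k <;> decide

lemma hov_john_mary : ∀ k, k < 4 →
    ((['j','o','h','n'] : List Char).drop k).isPrefixOf ['m','a','r','y'] = false := by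
  intro k h2
  interval_cases k <;> decide

lemma hov_mary_john : ∀ k, k < 4 →
    ((['m','a','r','y'] : List Char).drop k).isPrefixOf ['j','o','h','n'] = false := by
  intro k h2
  interval_cases k <;> decide

lemma johnL : "john".toList = ['j','o','h','n'] := rfl
lemma maryL : "mary".toList = ['m','a','r','y'] := rfl

lemma beq_toList (a b : String) : (a == b) = decide (a.toList = b.toList) := by
  by_cases h : a = b
  · subst h; simp
  · have hne : ¬ (a.toList = b.toList) := fun hh => h (String.toList_inj.mp hh)
    simp [h, hne]

lemma slice_add_four {α : Type} (xs : List α) (k : Nat) :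
    PySem.List.slice xs (some (↑k : Int)) (some ((↑k : Int) + 4)) = (xs.drop k).take 4 := by
  have h4 : ((↑k : Int) + 4) = ((↑k : Int) + ((4 : Nat) : Int)) := by norm_num
  rw [h4, PySem.List.slice_natCast_add]

lemma length_lower (l : List Char) : (PySem.Chars.lower l).length = l.length := by
  simp [PySem.Chars.lower]

-- take-4 window equality at a position is exactly isPrefixOf on the dropped list
lemma take4_eq_iff_prefix (p l : List Char) (hp : p.length = 4) (k : Nat) :
    decide ((l.drop k).take 4 = p) = p.isPrefixOf (l.drop k) := by
  rcases Bool.eq_false_or_eq_true (p.isPrefixOf (l.drop k)) with hb | hb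
  · rw [hb, decide_eq_true_eq]
    have hq := List.prefix_iff_eq_take.mp (List.isPrefixOf_iff_prefix.mp hb)
    rw [hp] at hq
    exact hq.symm
  · rw [hb, decide_eq_false_iff_not]
    intro he
    rw [Bool.eq_false_iff] at hb
    exact hb (List.isPrefixOf_iff_prefix.mpr
      (List.prefix_iff_eq_take.mpr (by rw [hp, he])))

-- A's result, characterised by the two overlapping window counts of the lowered string
lemma john_mary_eq_winCount (str : String) :
    john_mary str =
      decide (winCount ['j','o','h','n'] (PySem.Chars.lower str.toList) =
              winCount ['m','a','r','y'] (PySem.Chars.lower str.toList)) := by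
  unfold john_mary
  simp only [PySem.Str.len_eq]
  by_cases hn : str.toList.length ≤ 3
  · rw [PySem.List.pyRange_one_eq_nil (by omega)]
    rw [winCount_eq_zero_of_short _ _ (by decide) (by rw [length_lower]; omega),
        winCount_eq_zero_of_short _ _ (by decide) (by rw [length_lower]; omega)]
    rfl
  · have h4 : ((↑str.toList.length : Int) - 3) = ((str.toList.length - 3 : Nat) : Int) := by
      omega
    rw [h4, PySem.List.pyRange_zero_natCast, List.foldl_map]
    have hcong := PySem.List.foldl_congr_mem
      (List.range (str.toList.length - 3))
      (fun (x : Int × Int) (y : Nat) =>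
        if PySem.Str.lower (PySem.Str.slice str (some ↑y) (some (↑y + 4))) == "john"
          then (x.1 + 1, x.2)
        else if PySem.Str.lower (PySem.Str.slice str (some ↑y) (some (↑y + 4))) == "mary"
          then (x.1, x.2 + 1)
        else x)
      (fun (s : Int × Int) (k : Nat) =>
        (if decide (((PySem.Chars.lower str.toList).drop k).take 4 = "john".toList)
           then s.1 + 1 else s.1,
         if decide (((PySem.Chars.lower str.toList).drop k).take 4 = "mary".toList)
           then s.2 + 1 else s.2))
      ((0 : Int), (0 : Int))
      (by
        intro acc k _
        simp only [beq_toList, PySem.Str.toList_lower, PySem.Str.toList_slice,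
          PySem.Chars.slice_eq_listSlice, slice_add_four]
        have hlt : PySem.Chars.lower ((str.toList.drop k).take 4) =
            ((PySem.Chars.lower str.toList).drop k).take 4 := by
          simp [PySem.Chars.lower, List.map_take, List.map_drop]
        rw [hlt]
        by_cases hj : ((PySem.Chars.lower str.toList).drop k).take 4 = ['j', 'o', 'h', 'n']
        · have hm : ¬ ((PySem.Chars.lower str.toList).drop k).take 4 = ['m', 'a', 'r', 'y'] := by
            rw [hj]; decide
          simp [hj]
        · by_cases hm : ((PySem.Chars.lower str.toList).drop k).take 4 = ['m', 'a', 'r', 'y']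
          · simp [hm]
          · simp [hj, hm])
    rw [hcong]
    rw [PySem.List.foldl_prod_mk
      (f := fun (a : Int) (k : Nat) =>
        if decide (((PySem.Chars.lower str.toList).drop k).take 4 = "john".toList)
          then a + 1 else a)
      (g := fun (b : Int) (k : Nat) =>
        if decide (((PySem.Chars.lower str.toList).drop k).take 4 = "mary".toList)
          then b + 1 else b)]
    simp only [PySem.List.foldl_if_add_one, zero_add]
    have hlen : str.toList.length = (PySem.Chars.lower str.toList).length :=
      (length_lower _).symm
    rw [hlen, countP_range_eq_winCount _ (by decide), countP_range_eq_winCount _ (by decide)]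
    by_cases h : winCount ['j','o','h','n'] (PySem.Chars.lower str.toList) =
        winCount ['m','a','r','y'] (PySem.Chars.lower str.toList)
    · simp [h]
    · simp [h]

-- B's loop computes balance + (john windows) - (mary windows) of the unread part
lemma jmLoop_eq : ∀ (m : Nat) (s : String) (k : Nat) (bal : Int),
    s.toList.length - k ≤ m →
    jmLoop s (PySem.Str.len s) (↑k) bal =
      bal + (winCount ['j','o','h','n'] (s.toList.drop k) : Int)
          - (winCount ['m','a','r','y'] (s.toList.drop k) : Int) := by
  intro m
  induction m with
  | zero =>
    intro s k bal hm
    rw [jmLoop]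
    rw [dif_neg (by rw [PySem.Str.len_eq]; omega)]
    rw [winCount_eq_zero_of_short _ _ (by decide) (by simp only [List.length_drop]; omega),
        winCount_eq_zero_of_short _ _ (by decide) (by simp only [List.length_drop]; omega)]
    simp
  | succ m ih =>
    intro s k bal hm
    rw [jmLoop]
    by_cases hc : k + 4 ≤ s.toList.length
    · rw [dif_pos (by rw [PySem.Str.len_eq]; omega)]
      simp only [beq_toList, PySem.Str.toList_slice, PySem.Chars.slice_eq_listSlice,
        slice_add_four, johnL, maryL]
      have hcast4 : ((↑k : Int) + 4) = ((k + 4 : Nat) : Int) := by push_cast; ring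
      have hcast1 : ((↑k : Int) + 1) = ((k + 1 : Nat) : Int) := by push_cast; ring
      by_cases hj : (s.toList.drop k).take 4 = ['j','o','h','n']
      · have hpref : (['j','o','h','n'] : List Char).isPrefixOf (s.toList.drop k) = true := by
          rw [← take4_eq_iff_prefix _ _ (by decide), hj]; simp
        rw [if_pos (by simp [hj]), hcast4, ih s (k + 4) (bal + 1) (by omega)]
        have hd : s.toList.drop (k + 4) = (s.toList.drop k).drop 4 := by
          rw [List.drop_drop]
        rw [hd, winCount_drop4_self _ _ (by decide) hpref hov_john_self,
            winCount_drop4_other _ _ _ (by decide) (by decide) hpref hov_john_mary]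
        push_cast; ring
      · by_cases hmy : (s.toList.drop k).take 4 = ['m','a','r','y']
        · have hpref : (['m','a','r','y'] : List Char).isPrefixOf (s.toList.drop k) = true := by
            rw [← take4_eq_iff_prefix _ _ (by decide), hmy]; simp
          rw [if_neg (by simp [hj]), if_pos (by simp [hmy]), hcast4,
              ih s (k + 4) (bal - 1) (by omega)]
          have hd : s.toList.drop (k + 4) = (s.toList.drop k).drop 4 := by
            rw [List.drop_drop]
          rw [hd, winCount_drop4_self _ _ (by decide) hpref hov_mary_self,
              winCount_drop4_other _ _ _ (by decide) (by decide) hpref hov_mary_john]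
          push_cast; ring
        · have hpj : (['j','o','h','n'] : List Char).isPrefixOf (s.toList.drop k) = false := by
            rw [← take4_eq_iff_prefix _ _ (by decide)]
            simp [hj]
          have hpm : (['m','a','r','y'] : List Char).isPrefixOf (s.toList.drop k) = false := by
            rw [← take4_eq_iff_prefix _ _ (by decide)]
            simp [hmy]
          rw [if_neg (by simp [hj]), if_neg (by simp [hmy]), hcast1,
              ih s (k + 1) bal (by omega)]
          have hd : s.toList.drop (k + 1) = (s.toList.drop k).drop 1 := by
            rw [List.drop_drop]
          rw [hd, ← winCount_drop_one _ _ hpj, ← winCount_drop_one _ _ hpm]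
    · rw [dif_neg (by rw [PySem.Str.len_eq]; omega)]
      rw [winCount_eq_zero_of_short _ _ (by decide) (by simp only [List.length_drop]; omega),
          winCount_eq_zero_of_short _ _ (by decide) (by simp only [List.length_drop]; omega)]
      simp

-- ===== VERDICT (by name: the statement is the Claim_ definition above) =====
theorem john_mary_spec : Claim_equal_john_mary := by
  intro str _
  unfold Spec_john_mary
  rw [john_mary_eq_winCount]
  show _ = (jmLoop (PySem.Str.lower str) (PySem.Str.len (PySem.Str.lower str)) 0 0 == 0)
  have hL := jmLoop_eq (PySem.Str.lower str).toList.length (PySem.Str.lower str) 0 0 (by omega)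
  rw [Nat.cast_zero] at hL
  rw [hL]
  simp only [List.drop_zero, PySem.Str.toList_lower]
  by_cases h : winCount ['j','o','h','n'] (PySem.Chars.lower str.toList) =
      winCount ['m','a','r','y'] (PySem.Chars.lower str.toList)
  · simp [h]
  · simp [h]
    omega
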